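-- pv_equiv track=rewrite | github.com/GundalaNikhil/DSA | dsa-problems/Bitwise/testcases/comprehensive_generator.py | sol_012
-- ===== SOURCE A (Python) =====
-- from typing import List, Tuple
--
-- def sol_012(a: List[int]) -> int:
--     """BIT-012: Distinct Subarray XORs"""
--     xor_set = set()
--     n = len(a)
--     for i in range(n):
--         xor_val = 0
--         for j in range(i, n):
--             xor_val ^= a[j]
--             xor_set.add(xor_val)
--     return len(xor_set)
-- ===== SOURCE B (Python) =====
-- def sol_012(a):
--     """BIT-012: Distinct Subarray XORs, via a prefix-XOR table paired over all (l, r)."""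
--     p = [0]
--     acc = 0
--     for x in a:
--         acc ^= x
--         p.append(acc)
--     s = set()
--     m = len(p)
--     for l in range(m):
--         for r in range(l + 1, m):
--             s.add(p[r] ^ p[l])
--     return len(s)
-- ===== Notes on version B (the rewrite author's own statement) =====
-- stated objective: alternative
-- what changed: B first builds the prefix-XOR table p (p[0]=0, p[k]=p[k-1]^a[k-1]) in one pass and then takes pairwise XORs p[r]^p[l] over all 0<=l<r<=len(a), instead of A's recomputation of a running XOR restarted at every start index.
import Mathlib
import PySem

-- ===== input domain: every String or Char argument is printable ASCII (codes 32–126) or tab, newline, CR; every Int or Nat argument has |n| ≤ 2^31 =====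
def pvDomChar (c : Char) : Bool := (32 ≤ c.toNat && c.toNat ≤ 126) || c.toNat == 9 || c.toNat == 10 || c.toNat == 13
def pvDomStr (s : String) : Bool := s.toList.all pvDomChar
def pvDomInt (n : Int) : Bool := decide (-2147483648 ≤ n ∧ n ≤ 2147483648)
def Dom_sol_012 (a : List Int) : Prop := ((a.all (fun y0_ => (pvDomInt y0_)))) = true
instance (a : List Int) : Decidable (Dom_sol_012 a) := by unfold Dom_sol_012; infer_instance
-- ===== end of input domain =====

-- B replaces A's running XOR restarted at every start index by a prefix-XOR table built
-- once and then paired over all (l, r); alternative decomposition, same O(n^2) cost.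

-- ===== PORT A =====
-- A's inner-loop body: xor_val ^= a[j]; xor_set.add(xor_val)
def pvStepA (a : List Int) (st : Int × PySem.Set Int) (j : Int) : Int × PySem.Set Int :=
  (PySem.Int.bxor st.1 (PySem.List.pyGetD a j 0),
   PySem.Set.add st.2 (PySem.Int.bxor st.1 (PySem.List.pyGetD a j 0)))

def sol_012 (a : List Int) : Int :=
  let n : Int := PySem.List.len a
  let xorSet : PySem.Set Int :=
    (PySem.List.pyRange 0 n 1).foldl
      (fun s i => ((PySem.List.pyRange i n 1).foldl (pvStepA a) (0, s)).2)
      PySem.Set.empty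
  PySem.Set.len xorSet

-- ===== PORT B =====
-- B's inner-loop body: s.add(p[r] ^ p[l])
def pvStepB (p : List Int) (l : Int) (s : PySem.Set Int) (r : Int) : PySem.Set Int :=
  PySem.Set.add s (PySem.Int.bxor (PySem.List.pyGetD p r 0) (PySem.List.pyGetD p l 0))

def sol_012_alt (a : List Int) : Int :=
  let p : List Int :=
    (a.foldl
      (fun (st : List Int × Int) x =>
        (st.1 ++ [PySem.Int.bxor st.2 x], PySem.Int.bxor st.2 x))
      ([0], 0)).1
  let m : Int := PySem.List.len p
  let s : PySem.Set Int :=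
    (PySem.List.pyRange 0 m 1).foldl
      (fun s l => (PySem.List.pyRange (l + 1) m 1).foldl (pvStepB p l) s)
      PySem.Set.empty
  PySem.Set.len s

-- ===== PRECONDITION & SPEC =====
def Spec_sol_012 (a : List Int) (out : Int) : Prop := out = sol_012_alt a
instance (a : List Int) (out : Int) : Decidable (Spec_sol_012 a out) := by unfold Spec_sol_012; infer_instance

-- ===== CLAIM (what is proved, stated in full; the proofs are below) =====
def Claim_equal_sol_012 : Prop := ∀ (a : List Int), Dom_sol_012 a → Spec_sol_012 a (sol_012 a)

-- ===== LEMMAS AND PROOFS =====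

theorem pvBxor_assoc_nonneg (a b c : Int) (ha : 0 ≤ a) (hb : 0 ≤ b) (hc : 0 ≤ c) :
    PySem.Int.bxor (PySem.Int.bxor a b) c = PySem.Int.bxor a (PySem.Int.bxor b c) := by
  rw [PySem.Int.bxor_of_nonneg ha hb, PySem.Int.bxor_of_nonneg hb hc,
      PySem.Int.bxor_of_nonneg (Int.natCast_nonneg _) hc,
      PySem.Int.bxor_of_nonneg ha (Int.natCast_nonneg _)]
  simp [Nat.xor_assoc]

theorem pvBxor_compl_left (a b : Int) :
    PySem.Int.bxor (-a - 1) b = -(PySem.Int.bxor a b) - 1 := by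
  have key : -(-a - 1) - 1 = a := by ring
  simp only [PySem.Int.bxor]
  split_ifs <;> first | (exfalso; omega) | (rw [key]; ring) | ring

theorem pvBxor_compl_right (a b : Int) :
    PySem.Int.bxor a (-b - 1) = -(PySem.Int.bxor a b) - 1 := by
  rw [PySem.Int.bxor_comm, pvBxor_compl_left, PySem.Int.bxor_comm]

theorem pvNegSplit (x : Int) (hx : x < 0) : ∃ y : Int, 0 ≤ y ∧ x = -y - 1 :=
  ⟨-x - 1, by omega, by ring⟩

theorem pvBxor_assoc (a b c : Int) :
    PySem.Int.bxor (PySem.Int.bxor a b) c = PySem.Int.bxor a (PySem.Int.bxor b c) := by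
  rcases le_or_gt 0 a with ha | ha <;> rcases le_or_gt 0 b with hb | hb <;>
    rcases le_or_gt 0 c with hc | hc
  · exact pvBxor_assoc_nonneg a b c ha hb hc
  · obtain ⟨c', hc', rfl⟩ := pvNegSplit c hc
    simp [pvBxor_compl_left, pvBxor_compl_right, pvBxor_assoc_nonneg a b c' ha hb hc']
  · obtain ⟨b', hb', rfl⟩ := pvNegSplit b hb
    simp [pvBxor_compl_left, pvBxor_compl_right, pvBxor_assoc_nonneg a b' c ha hb' hc]
  · obtain ⟨b', hb', rfl⟩ := pvNegSplit b hb
    obtain ⟨c', hc', rfl⟩ := pvNegSplit c hc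
    simp [pvBxor_compl_left, pvBxor_compl_right, pvBxor_assoc_nonneg a b' c' ha hb' hc']
  · obtain ⟨a', ha', rfl⟩ := pvNegSplit a ha
    simp [pvBxor_compl_left, pvBxor_compl_right, pvBxor_assoc_nonneg a' b c ha' hb hc]
  · obtain ⟨a', ha', rfl⟩ := pvNegSplit a ha
    obtain ⟨c', hc', rfl⟩ := pvNegSplit c hc
    simp [pvBxor_compl_left, pvBxor_compl_right, pvBxor_assoc_nonneg a' b c' ha' hb hc']
  · obtain ⟨a', ha', rfl⟩ := pvNegSplit a ha
    obtain ⟨b', hb', rfl⟩ := pvNegSplit b hb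
    simp [pvBxor_compl_left, pvBxor_compl_right, pvBxor_assoc_nonneg a' b' c ha' hb' hc]
  · obtain ⟨a', ha', rfl⟩ := pvNegSplit a ha
    obtain ⟨b', hb', rfl⟩ := pvNegSplit b hb
    obtain ⟨c', hc', rfl⟩ := pvNegSplit c hc
    simp [pvBxor_compl_left, pvBxor_compl_right, pvBxor_assoc_nonneg a' b' c' ha' hb' hc']

theorem pvBxor_right_comm (a b c : Int) :
    PySem.Int.bxor (PySem.Int.bxor a b) c = PySem.Int.bxor (PySem.Int.bxor a c) b := by
  rw [pvBxor_assoc, PySem.Int.bxor_comm b c, ← pvBxor_assoc]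

-- the tail of B's prefix table, as a function
def pvP : List Int → Int → List Int
  | [], _ => []
  | x :: xs, acc => PySem.Int.bxor acc x :: pvP xs (PySem.Int.bxor acc x)

theorem pvP_length (xs : List Int) (acc : Int) : (pvP xs acc).length = xs.length := by
  induction xs generalizing acc with
  | nil => rfl
  | cons x xs ih => simp [pvP, ih]

-- B's building loop produces pre ++ pvP xs acc
theorem pvBuild (xs : List Int) (pre : List Int) (acc : Int) :
    (xs.foldl (fun (st : List Int × Int) x =>
        (st.1 ++ [PySem.Int.bxor st.2 x], PySem.Int.bxor st.2 x)) (pre, acc)).1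
      = pre ++ pvP xs acc := by
  induction xs generalizing pre acc with
  | nil => simp [pvP]
  | cons x xs ih => simp [pvP, ih]

-- the recurrence p[k+1] = p[k] ^ a[k] for the prefix table
theorem pvP_rec (xs : List Int) (acc : Int) (k : Nat) (hk : k < xs.length) :
    (acc :: pvP xs acc).getD (k + 1) 0
      = PySem.Int.bxor ((acc :: pvP xs acc).getD k 0) (xs.getD k 0) := by
  induction xs generalizing acc k with
  | nil => simp at hk
  | cons x xs ih =>
    cases k with
    | zero => simp [pvP]
    | succ k =>
      have hk' : k < xs.length := by simpa using hk
      simpa [pvP] using ih (PySem.Int.bxor acc x) k hk'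

-- A's inner running-XOR loop from j equals B's pairing loop from j+1
theorem pvInner (a p : List Int) (i : Int)
    (hrec : ∀ k : Nat, k < a.length →
      p.getD (k + 1) 0 = PySem.Int.bxor (p.getD k 0) (a.getD k 0)) :
    ∀ (fuel : Nat) (j : Int), 0 ≤ j → j ≤ (a.length : Int) →
      fuel = ((a.length : Int) - j).toNat →
      ∀ (v : Int) (s : PySem.Set Int),
        v = PySem.Int.bxor (PySem.List.pyGetD p j 0) (PySem.List.pyGetD p i 0) →
        ((PySem.List.pyRange j (a.length : Int) 1).foldl (pvStepA a) (v, s)).2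
          = (PySem.List.pyRange (j + 1) ((a.length : Int) + 1) 1).foldl (pvStepB p i) s := by
  intro fuel
  induction fuel with
  | zero =>
    intro j hj0 hjn hf v s hv
    have hj : j = (a.length : Int) := by omega
    subst hj
    rw [PySem.List.pyRange_one_eq_nil (le_refl _), PySem.List.pyRange_one_eq_nil (by omega)]
    rfl
  | succ fuel ih =>
    intro j hj0 hjn hf v s hv
    have hjlt : j < (a.length : Int) := by omega
    rw [PySem.List.pyRange_one_cons hjlt,
        PySem.List.pyRange_one_cons (by omega : j + 1 < (a.length : Int) + 1)]
    simp only [List.foldl_cons]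
    have hsucc : (j + 1).toNat = j.toNat + 1 := by omega
    have hklt : j.toNat < a.length := by omega
    have hstep : PySem.Int.bxor v (PySem.List.pyGetD a j 0)
        = PySem.Int.bxor (PySem.List.pyGetD p (j + 1) 0) (PySem.List.pyGetD p i 0) := by
      rw [hv, pvBxor_right_comm]
      congr 1
      rw [PySem.List.pyGetD_of_nonneg _ _ hj0, PySem.List.pyGetD_of_nonneg _ _ hj0,
          PySem.List.pyGetD_of_nonneg _ _ (by omega : (0:Int) ≤ j + 1), hsucc]
      exact (hrec j.toNat hklt).symm
    have hA : pvStepA a (v, s) j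
        = (PySem.Int.bxor (PySem.List.pyGetD p (j + 1) 0) (PySem.List.pyGetD p i 0),
           PySem.Set.add s (PySem.Int.bxor (PySem.List.pyGetD p (j + 1) 0) (PySem.List.pyGetD p i 0))) := by
      simp [pvStepA, hstep]
    rw [hA]
    have hB : pvStepB p i s (j + 1)
        = PySem.Set.add s (PySem.Int.bxor (PySem.List.pyGetD p (j + 1) 0) (PySem.List.pyGetD p i 0)) := rfl
    rw [hB]
    exact ih (j + 1) (by omega) (by omega) (by omega) _ _ rfl

-- the main equivalence
theorem pvMain (a : List Int) : sol_012 a = sol_012_alt a := by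
  simp only [sol_012, sol_012_alt, PySem.List.len_eq, pvBuild]
  have hp : ([0] ++ pvP a 0 : List Int) = 0 :: pvP a 0 := rfl
  rw [hp]
  have hrec : ∀ k : Nat, k < a.length →
      (0 :: pvP a 0).getD (k + 1) 0
        = PySem.Int.bxor ((0 :: pvP a 0).getD k 0) (a.getD k 0) :=
    fun k hk => pvP_rec a 0 k hk
  have hm : ((0 :: pvP a 0).length : Int) = (a.length : Int) + 1 := by
    simp [pvP_length]
  rw [hm]
  have hsplit : PySem.List.pyRange 0 ((a.length : Int) + 1) 1
      = PySem.List.pyRange 0 (a.length : Int) 1 ++ [(a.length : Int)] :=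
    PySem.List.pyRange_one_succ_right (by omega)
  rw [hsplit, List.foldl_append]
  simp only [List.foldl_cons, List.foldl_nil]
  rw [PySem.List.pyRange_one_eq_nil (le_refl ((a.length : Int) + 1)), List.foldl_nil]
  congr 1
  apply PySem.List.foldl_congr_mem
  intro s i hi
  rcases (PySem.List.mem_pyRange_one).1 hi with ⟨hi0, hin⟩
  exact pvInner a (0 :: pvP a 0) i hrec ((a.length : Int) - i).toNat i hi0 (by omega) rfl 0 s
    (PySem.Int.bxor_self _).symm

-- ===== VERDICT (by name: the statement is the Claim_ definition above) =====
theorem sol_012_spec : Claim_equal_sol_012 := by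
  intro a _
  unfold Spec_sol_012
  exact pvMain a
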